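-- pv_equiv track=rewrite | github.com/evonove/django-stored-messages | tests/test_redis_backend.py | _same_message
-- ===== SOURCE A (Python) =====
-- def _same_message(one, other):
--     same = True
--     try:
--         for k, v in one.items():
--             same &= other[k] == v
--         return same
--     except KeyError:
--         return False
-- ===== SOURCE B (Python) =====
-- def _same_message(one, other):
--     # Merge-and-compare: overlaying `one` on a copy of `other` changes nothing
--     # exactly when every (key, value) pair of `one` already occurs in `other`.
--     merged = dict(other)
--     merged.update(one)
--     return merged == other
-- ===== Notes on version B (the rewrite author's own statement) =====
-- stated objective: alternative
-- what changed: Instead of looking up each key of `one` in `other` and accumulating comparisons under a KeyError guard, B overlays `one` onto a copy of `other` and tests whether the merged dict equals `other` (overlaying changes nothing iff every pair of `one` is already in `other`).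
import Mathlib
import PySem

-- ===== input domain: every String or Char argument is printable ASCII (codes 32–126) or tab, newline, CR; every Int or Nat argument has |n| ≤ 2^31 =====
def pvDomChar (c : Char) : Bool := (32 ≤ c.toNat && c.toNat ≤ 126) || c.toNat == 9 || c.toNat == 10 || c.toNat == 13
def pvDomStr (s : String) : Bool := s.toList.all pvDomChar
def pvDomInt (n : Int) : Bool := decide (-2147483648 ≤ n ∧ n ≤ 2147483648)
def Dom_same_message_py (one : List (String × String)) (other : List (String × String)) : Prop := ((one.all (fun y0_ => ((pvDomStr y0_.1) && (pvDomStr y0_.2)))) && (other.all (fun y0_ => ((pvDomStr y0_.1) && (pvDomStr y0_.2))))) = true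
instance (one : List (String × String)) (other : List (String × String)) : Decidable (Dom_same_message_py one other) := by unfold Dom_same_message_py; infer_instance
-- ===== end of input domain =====

-- B replaces A's per-key lookup loop (with its KeyError guard) by merge-and-compare:
-- overlay `one` on a copy of `other` and test whether the merged dict equals `other`.

-- ===== PORT A =====
-- the for-loop with the KeyError handler: a missing key aborts with False, otherwise 'same' accumulates
def sameLoop (d2 : PySem.Dict String String) : List (String × String) → Bool → Bool
  | [], same => same
  | (k, v) :: rest, same =>
    match d2.get? k with
    | none => false                        -- other[k] raises KeyError → except: return False
    | some w => sameLoop d2 rest (same && (w == v))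

def same_message_py (one : List (String × String)) (other : List (String × String)) : Bool :=
  sameLoop (PySem.Dict.ofList other) (PySem.Dict.ofList one).items true

-- ===== PORT B =====
-- Python's dict == (order-insensitive: same number of keys, every pair of d1 found in d2);
-- exact because PySem.Dict keeps unique keys, while Lean's '=' on Dict would also compare order.
def dictPyEq (d1 d2 : PySem.Dict String String) : Bool :=
  d1.items.length == d2.items.length && d1.items.all (fun p => d2.get? p.1 == some p.2)

def same_message_py_alt (one : List (String × String)) (other : List (String × String)) : Bool :=
  -- merged = dict(other); merged.update(one)  (update = insert each pair in order)
  let merged := (PySem.Dict.ofList one).items.foldl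
      (fun d p => d.insert p.1 p.2) (PySem.Dict.ofList other)
  dictPyEq merged (PySem.Dict.ofList other)

-- ===== PRECONDITION & SPEC =====
def Spec_same_message_py (one : List (String × String)) (other : List (String × String)) (out : Bool) : Prop := out = same_message_py_alt one other
instance (one : List (String × String)) (other : List (String × String)) (out : Bool) : Decidable (Spec_same_message_py one other out) := by unfold Spec_same_message_py; infer_instance

-- ===== CLAIM (what is proved, stated in full; the proofs are below) =====
def Claim_equal_same_message_py : Prop := ∀ (one : List (String × String)) (other : List (String × String)), Dom_same_message_py one other → Spec_same_message_py one other (same_message_py one other)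

-- ===== LEMMAS AND PROOFS =====

-- A's loop is the conjunction of the per-pair lookups (False absorbs the KeyError exit)
theorem sameLoop_eq_all (d2 : PySem.Dict String String) (l : List (String × String)) (same : Bool) :
    sameLoop d2 l same = (same && l.all (fun p => d2.get? p.1 == some p.2)) := by
  induction l generalizing same with
  | nil => simp [sameLoop]
  | cons p rest ih =>
    obtain ⟨k, v⟩ := p
    simp only [sameLoop]
    cases h : d2.get? k with
    | none => simp [List.all_cons, h]
    | some w => simp [List.all_cons, h, ih, Bool.and_assoc]

-- a dict with unique keys equals itself under Python's ==
theorem dictPyEq_self (d : PySem.Dict String String) (h : d.keys.Nodup) : dictPyEq d d = true := by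
  unfold dictPyEq
  simp only [beq_self_eq_true, Bool.true_and, List.all_eq_true]
  intro p hp
  obtain ⟨k, v⟩ := p
  simp [PySem.Dict.get?_of_mem_items d hp h]

-- inserting an already-present pair is the identity
theorem insert_mem_eq (d : PySem.Dict String String) (k v : String)
    (hnd : d.keys.Nodup) (h : d.get? k = some v) : d.insert k v = d := by
  apply PySem.Dict.ext
  have hc : d.contains k = true := by
    rw [PySem.Dict.contains_eq_isSome_get?, h]; rfl
  rw [PySem.Dict.items_insert_of_contains d v hc]
  have : ∀ p ∈ d.items, (if p.1 == k then (k, v) else p) = p := by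
    intro p hp
    obtain ⟨k', v'⟩ := p
    by_cases hk : k' = k
    · subst hk
      have := PySem.Dict.get?_of_mem_items d hp hnd
      rw [h] at this
      simp [Option.some.injEq] at this
      simp [this]
    · simp [hk]
  rw [List.map_congr_left this]
  simp

-- a fold of inserts over keys avoiding k leaves the lookup at k unchanged
theorem get?_foldl_insert_of_not_mem (l : List (String × String)) (d : PySem.Dict String String)
    (k : String) (h : k ∉ l.map Prod.fst) :
    (l.foldl (fun d p => d.insert p.1 p.2) d).get? k = d.get? k := by
  induction l generalizing d with
  | nil => rfl
  | cons p rest ih =>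
    simp only [List.map_cons, List.mem_cons, not_or] at h
    simp only [List.foldl_cons]
    rw [ih _ h.2, PySem.Dict.get?_insert_of_ne d p.2 h.1]

-- a fold of inserts never shrinks the dict
theorem length_foldl_insert_ge (l : List (String × String)) (d : PySem.Dict String String) :
    d.items.length ≤ (l.foldl (fun d p => d.insert p.1 p.2) d).items.length := by
  induction l generalizing d with
  | nil => exact le_refl _
  | cons p rest ih =>
    refine le_trans ?_ (ih (d.insert p.1 p.2))
    rw [PySem.Dict.items_insert]
    split
    · simp
    · simp

-- the core characterisation: merging l into d gives back (Python-)equal to d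
-- exactly when each pair of l is already in d
theorem merge_eq_iff_all (l : List (String × String)) (d : PySem.Dict String String)
    (hnd : d.keys.Nodup) (hl : (l.map Prod.fst).Nodup) :
    dictPyEq (l.foldl (fun d p => d.insert p.1 p.2) d) d
      = l.all (fun p => d.get? p.1 == some p.2) := by
  induction l generalizing d with
  | nil => simp [dictPyEq_self d hnd]
  | cons p rest ih =>
    obtain ⟨k, v⟩ := p
    simp only [List.map_cons, List.nodup_cons] at hl
    simp only [List.foldl_cons, List.all_cons]
    cases h : d.get? k with
    | some w =>
      by_cases hw : w = v
      · subst hw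
        rw [insert_mem_eq d k w hnd h, ih d hnd hl.2]
        simp
      · -- merged still maps k to v ≠ w, so the all-check of dictPyEq fails
        have hk : (rest.foldl (fun d p => d.insert p.1 p.2) (d.insert k v)).get? k = some v := by
          rw [get?_foldl_insert_of_not_mem _ _ _ hl.1, PySem.Dict.get?_insert_self]
        have hmem := PySem.Dict.mem_items_of_get?_eq_some _ hk
        have : ((rest.foldl (fun d p => d.insert p.1 p.2) (d.insert k v)).items.all
            (fun p => d.get? p.1 == some p.2)) = false := by
          rw [List.all_eq_false]
          exact ⟨(k, v), hmem, by simp [h, hw]⟩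
        unfold dictPyEq
        rw [this]
        simp [hw]
    | none =>
      -- a fresh key: the merged dict is strictly larger, so the length check fails
      have hc : d.contains k = false := by
        rw [PySem.Dict.contains_eq_isSome_get?, h]; rfl
      have hlen : d.items.length + 1 ≤
          (rest.foldl (fun d p => d.insert p.1 p.2) (d.insert k v)).items.length := by
        have := length_foldl_insert_ge rest (d.insert k v)
        rwa [PySem.Dict.items_insert_of_not_contains d v hc, List.length_append,
          List.length_cons, List.length_nil] at this
      unfold dictPyEq
      have : ((rest.foldl (fun d p => d.insert p.1 p.2) (d.insert k v)).items.length
          == d.items.length) = false := by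
        rw [beq_eq_false_iff_ne]
        omega
      rw [this]
      simp

-- ===== VERDICT (by name: the statement is the Claim_ definition above) =====
theorem same_message_py_spec : Claim_equal_same_message_py := by
  intro one other _
  unfold Spec_same_message_py same_message_py same_message_py_alt
  rw [sameLoop_eq_all, Bool.true_and,
    merge_eq_iff_all _ _ (PySem.Dict.nodup_keys_ofList other)
      (PySem.Dict.nodup_keys_ofList one)]
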